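-- pv_equiv track=rewrite | github.com/Anspar-Org/elspais | tests/test_cli_string_validity.py | _tokenize_command
-- ===== SOURCE A (Python) =====
-- _TERMINATORS = set("`\"'|\n#")
--
-- def _tokenize_command(text: str) -> list[str]:
--     """Split the command-line fragment into tokens up to a terminator.
--
--     Stops at: the first quote / backtick / pipe / newline / shell-comment
--     `#`, OR a run of 3+ consecutive spaces (used for column-alignment in
--     help-text tables like `elspais example --full        Display …`).
--     """
--     tokens: list[str] = []
--     buf: list[str] = []
--     space_run = 0
--     for ch in text:
--         if ch in _TERMINATORS:
--             break
--         if ch == " ":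
--             space_run += 1
--             if space_run >= 3:
--                 break
--             if buf:
--                 tokens.append("".join(buf))
--                 buf = []
--             continue
--         if ch.isspace():
--             # tab / other whitespace: treat as single-space separator
--             if buf:
--                 tokens.append("".join(buf))
--                 buf = []
--             space_run = 0
--             continue
--         space_run = 0
--         buf.append(ch)
--     if buf:
--         tokens.append("".join(buf))
--     return tokens
-- ===== SOURCE B (Python) =====
-- _TERMINATORS = set("`\"'|\n#")
--
-- def _tokenize_command(text: str) -> list[str]:
--     """Cut the text at the first terminator or 3-space run, then str.split()."""
--     cut = len(text)
--     for i, ch in enumerate(text):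
--         if ch in _TERMINATORS:
--             cut = i
--             break
--     j = text.find("   ")
--     if j != -1 and j < cut:
--         cut = j
--     return text[:cut].split()
-- ===== Notes on version B (the rewrite author's own statement) =====
-- stated objective: simpler
-- what changed: A's per-character state machine (explicit token buffer and space_run counter) is replaced by computing one cut index (first terminator, capped by the first 3-space run found via str.find) and returning str.split() of the prefix.
import Mathlib
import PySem

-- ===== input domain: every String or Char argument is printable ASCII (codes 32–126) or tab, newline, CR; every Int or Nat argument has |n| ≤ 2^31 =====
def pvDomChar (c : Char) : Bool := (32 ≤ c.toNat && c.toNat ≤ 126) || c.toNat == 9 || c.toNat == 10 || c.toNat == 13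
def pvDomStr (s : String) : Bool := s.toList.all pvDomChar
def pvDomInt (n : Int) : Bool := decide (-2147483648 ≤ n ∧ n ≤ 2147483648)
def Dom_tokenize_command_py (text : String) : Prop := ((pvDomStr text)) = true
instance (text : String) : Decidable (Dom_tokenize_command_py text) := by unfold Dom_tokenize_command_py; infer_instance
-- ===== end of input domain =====

-- B replaces A's per-character buffer/space_run state machine by computing a single cut
-- index (first terminator or first 3-space run) and calling str.split() on the prefix;
-- objective: simpler. Return values agree on all inputs (both are total).

-- ===== PORT A =====
-- module constant _TERMINATORS = set("`\"'|\n#")  (a Python set: the distinct elements)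
def pyTERMINATORS : List Char := ['`', '"', '\'', '|', '\n', '#']

-- the for-loop of A: state = (tokens, buf, space_run)
def tokA : List Char → List String → List Char → Nat → List String
  | [], tokens, buf, _ =>
      if buf.isEmpty then tokens else tokens ++ [String.ofList buf]
  | c :: rest, tokens, buf, run =>
      if pyTERMINATORS.contains c then
        (if buf.isEmpty then tokens else tokens ++ [String.ofList buf])
      else if c = ' ' then
        (if run + 1 ≥ 3 then (if buf.isEmpty then tokens else tokens ++ [String.ofList buf])
         else if buf.isEmpty then tokA rest tokens buf (run + 1)
         else tokA rest (tokens ++ [String.ofList buf]) [] (run + 1))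
      else if PySem.Chars.isspace c then
        (if buf.isEmpty then tokA rest tokens buf 0
         else tokA rest (tokens ++ [String.ofList buf]) [] 0)
      else tokA rest tokens (buf ++ [c]) 0

def tokenize_command_py (text : String) : List String :=
  tokA text.toList [] [] 0

-- ===== PORT B =====
-- B's terminator scan: `cut = len(text); for i, ch in enumerate(text): if ch in _TERMINATORS: cut = i; break`
def bScan : List Char → Nat → Nat → Nat
  | [], _, cut => cut
  | c :: rest, i, cut => if pyTERMINATORS.contains c then i else bScan rest (i + 1) cut

def tokenize_command_py_alt (text : String) : List String :=
  let cut0 := bScan text.toList 0 (PySem.Str.len text).toNat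
  let j := PySem.Str.find text (String.ofList [' ', ' ', ' '])
  let cut := if j ≠ -1 ∧ j < (cut0 : Int) then j.toNat else cut0
  PySem.Str.split₀ (PySem.Str.slice text none (some (cut : Int)))

-- ===== PRECONDITION & SPEC =====
def Spec_tokenize_command_py (text : String) (out : List String) : Prop := out = tokenize_command_py_alt text
instance (text : String) (out : List String) : Decidable (Spec_tokenize_command_py text out) := by unfold Spec_tokenize_command_py; infer_instance

-- ===== CLAIM (what is proved, stated in full; the proofs are below) =====
def Claim_equal_tokenize_command_py : Prop := ∀ (text : String), Dom_tokenize_command_py text → Spec_tokenize_command_py text (tokenize_command_py text)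

-- ===== LEMMAS AND PROOFS =====

-- words-with-carry: the common denominator of both programs (proof-side only)
def wordsC : List Char → List Char → List (List Char)
  | buf, [] => if buf.isEmpty then [] else [buf]
  | buf, c :: cs =>
      if PySem.Chars.isspace c then
        (if buf.isEmpty then wordsC [] cs else buf :: wordsC [] cs)
      else wordsC (buf ++ [c]) cs

-- index of the first terminator (length if none)
def termIdx : List Char → Nat
  | [] => 0
  | c :: cs => if pyTERMINATORS.contains c then 0 else termIdx cs + 1

-- index at which A's space_run break fires, given `run` spaces already counted (length if never)
def spIdx : List Char → Nat → Nat
  | [], _ => 0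
  | c :: cs, r => if c = ' ' then (if r + 1 ≥ 3 then 0 else spIdx cs (r + 1) + 1) else spIdx cs 0 + 1

-- index of the THIRD space of the first 3-space run (length if none)
def trip3 : List Char → Nat
  | [] => 0
  | c :: cs => if [' ', ' ', ' '].isPrefixOf (c :: cs) then 2 else trip3 cs + 1

lemma termIdx_le (cs : List Char) : termIdx cs ≤ cs.length := by
  induction cs with
  | nil => simp [termIdx]
  | cons c cs ih => simp only [termIdx, List.length_cons]; split <;> omega

lemma termIdx_spec (cs : List Char) (h : termIdx cs < cs.length) :
    pyTERMINATORS.contains cs[termIdx cs] = true := by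
  induction cs with
  | nil => simp at h
  | cons c cs ih =>
    by_cases hc : pyTERMINATORS.contains c
    · simp only [termIdx, if_pos hc]; simpa using hc
    · simp only [termIdx, if_neg hc, List.length_cons] at h ⊢
      simpa [List.getElem_cons_succ] using ih (by omega)

lemma prefix2_prefix1 (cs : List Char) (h : [' ', ' '].isPrefixOf cs = true) :
    [' '].isPrefixOf cs = true := by
  match cs with
  | c :: cs' => simp [List.isPrefixOf] at h ⊢; exact h.1

lemma spIdx_trip3 (cs : List Char) :
    spIdx cs 0 = trip3 cs ∧
    spIdx cs 1 = (if [' ', ' '].isPrefixOf cs then 1 else trip3 cs) ∧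
    spIdx cs 2 = (if [' '].isPrefixOf cs then 0 else trip3 cs) := by
  induction cs with
  | nil => simp [spIdx, trip3, List.isPrefixOf]
  | cons c cs ih =>
    obtain ⟨ih0, ih1, ih2⟩ := ih
    by_cases hc : c = ' '
    · subst hc
      have hpre : ∀ t : List Char, [' ', ' ', ' '].isPrefixOf (' ' :: t) = [' ', ' '].isPrefixOf t := by
        intro t; simp [List.isPrefixOf]
      have hpre2 : ∀ t : List Char, [' ', ' '].isPrefixOf (' ' :: t) = [' '].isPrefixOf t := by
        intro t; simp [List.isPrefixOf]
      have hpre1 : [' '].isPrefixOf (' ' :: cs) = true := by simp [List.isPrefixOf]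
      refine ⟨?_, ?_, ?_⟩
      · simp only [spIdx, trip3, hpre, ih1]
        by_cases h2 : [' ', ' '].isPrefixOf cs <;> simp [h2]
      · simp only [spIdx, hpre2, ih2]
        by_cases h1 : [' '].isPrefixOf cs
        · simp [h1]
        · have h2 : [' ', ' '].isPrefixOf cs = false := by
            by_contra hx
            exact h1 (prefix2_prefix1 cs (by simpa using hx))
          simp [h1, trip3, hpre, h2]
      · simp [spIdx, hpre1]
    · have hpre : [' ', ' ', ' '].isPrefixOf (c :: cs) = false := by
        simp only [List.isPrefixOf, Bool.and_eq_false_iff]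
        left; simpa using fun h => hc h.symm
      have hpre2 : [' ', ' '].isPrefixOf (c :: cs) = false := by
        simp only [List.isPrefixOf, Bool.and_eq_false_iff]
        left; simpa using fun h => hc h.symm
      have hpre1 : [' '].isPrefixOf (c :: cs) = false := by
        simp only [List.isPrefixOf, Bool.and_eq_false_iff]
        left; simpa using fun h => hc h.symm
      refine ⟨?_, ?_, ?_⟩ <;> simp [spIdx, hc, trip3, hpre, hpre2, hpre1, ih0]

lemma trip3_le (cs : List Char) : trip3 cs ≤ cs.length := by
  induction cs with
  | nil => simp [trip3]
  | cons c cs ih =>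
    simp only [trip3, List.length_cons]
    split
    · next h =>
      have := (List.isPrefixOf_iff_prefix.mp h).length_le
      simp at this; omega
    · omega

lemma trip3_spec (cs : List Char) (h : trip3 cs < cs.length) :
    2 ≤ trip3 cs ∧ [' ', ' ', ' '] <+: cs.drop (trip3 cs - 2) := by
  induction cs with
  | nil => simp [trip3] at h
  | cons c cs ih =>
    by_cases hp : [' ', ' ', ' '].isPrefixOf (c :: cs) = true
    · have ht : trip3 (c :: cs) = 2 := by simp [trip3, hp]
      rw [ht]
      exact ⟨le_refl 2, by simpa using List.isPrefixOf_iff_prefix.mp hp⟩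
    · have hp' : [' ', ' ', ' '].isPrefixOf (c :: cs) = false := Bool.eq_false_iff.mpr hp
      have ht : trip3 (c :: cs) = trip3 cs + 1 := by simp [trip3, hp']
      rw [ht] at h ⊢
      have h' : trip3 cs < cs.length := by simp at h; omega
      obtain ⟨h2, hpre⟩ := ih h'
      refine ⟨by omega, ?_⟩
      rw [show trip3 cs + 1 - 2 = (trip3 cs - 2) + 1 by omega]
      simpa [List.drop_succ_cons] using hpre

-- find.go on "   " computes trip3
lemma find_go_trip3 (cs : List Char) : ∀ k : Nat,
    PySem.Chars.find.go [' ', ' ', ' '] cs k =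
      if trip3 cs < cs.length then ((k + trip3 cs : Nat) : Int) - 2 else -1 := by
  induction cs with
  | nil => intro k; simp [PySem.Chars.find.go, trip3]
  | cons c cs ih =>
    intro k
    by_cases hp : [' ', ' ', ' '].isPrefixOf (c :: cs) = true
    · have hlen : 3 ≤ (c :: cs).length :=
        by simpa using (List.isPrefixOf_iff_prefix.mp hp).length_le
      have ht : trip3 (c :: cs) = 2 := by simp [trip3, hp]
      rw [show PySem.Chars.find.go [' ', ' ', ' '] (c :: cs) k = (k : Int) by
        simp [PySem.Chars.find.go, hp]]
      rw [ht, if_pos (by simp at hlen ⊢; omega)]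
      push_cast; ring
    · have hp' : [' ', ' ', ' '].isPrefixOf (c :: cs) = false := Bool.eq_false_iff.mpr hp
      have ht : trip3 (c :: cs) = trip3 cs + 1 := by simp [trip3, hp']
      rw [show PySem.Chars.find.go [' ', ' ', ' '] (c :: cs) k
            = PySem.Chars.find.go [' ', ' ', ' '] cs (k + 1) by
        simp [PySem.Chars.find.go, hp']]
      rw [ih (k + 1), ht]
      by_cases h : trip3 cs < cs.length
      · rw [if_pos h, if_pos (by simp; omega)]
        push_cast; ring
      · rw [if_neg h, if_neg (by simp; omega)]

-- split₀.go computes wordsC (with the current word reversed, accumulator reversed)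
lemma split₀_go_wordsC (cs : List Char) : ∀ cur acc,
    PySem.Chars.split₀.go cs cur acc = acc.reverse ++ wordsC cur.reverse cs := by
  induction cs with
  | nil =>
    intro cur acc
    by_cases h : cur.isEmpty <;>
      simp_all [PySem.Chars.split₀.go, wordsC, List.isEmpty_iff]
  | cons c cs ih =>
    intro cur acc
    by_cases hs : PySem.Chars.isspace c
    · by_cases h : cur.isEmpty <;>
        simp_all [PySem.Chars.split₀.go, wordsC, List.isEmpty_iff]
    · simpa [PySem.Chars.split₀.go, wordsC, hs] using ih (c :: cur) acc

-- trailing single space does not change the words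
lemma wordsC_append_space (cs : List Char) : ∀ buf,
    wordsC buf (cs ++ [' ']) = wordsC buf cs := by
  induction cs with
  | nil =>
    intro buf
    by_cases h : buf.isEmpty <;>
      simp [wordsC, h, (by decide : PySem.Chars.isspace ' ' = true)]
  | cons c cs ih =>
    intro buf
    by_cases hs : PySem.Chars.isspace c <;>
      simp [wordsC, hs, ih]

-- A's loop computes wordsC of the prefix cut at the first terminator / space-run break
lemma tokA_eq (cs : List Char) : ∀ tokens buf run, run ≤ 2 → (buf = [] ∨ run = 0) →
    tokA cs tokens buf run =
      tokens ++ (wordsC buf (cs.take (min (termIdx cs) (spIdx cs run)))).map String.ofList := by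
  induction cs with
  | nil =>
    intro tokens buf run _ _
    by_cases h : buf.isEmpty <;> simp_all [tokA, wordsC, List.isEmpty_iff]
  | cons c cs ih =>
    intro tokens buf run hrun hbr
    by_cases hterm : pyTERMINATORS.contains c
    · have htm : c ∈ pyTERMINATORS := by simpa using hterm
      have : termIdx (c :: cs) = 0 := by simp [termIdx, htm]
      rw [this]
      simp only [Nat.zero_min, List.take_zero]
      by_cases h : buf.isEmpty <;> simp_all [tokA, wordsC, List.isEmpty_iff]
    · have htm : c ∉ pyTERMINATORS := by simpa using hterm
      have htermc : termIdx (c :: cs) = termIdx cs + 1 := by simp [termIdx, htm]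
      by_cases hsp : c = ' '
      · subst hsp
        have hss : PySem.Chars.isspace ' ' = true := by decide
        by_cases h3 : run + 1 ≥ 3
        · have hrun2 : run = 2 := by omega
          have hbuf : buf = [] := by
            rcases hbr with h | h
            · exact h
            · exact absurd (h ▸ hrun2) (by norm_num)
          subst hrun2; subst hbuf
          have : spIdx (' ' :: cs) 2 = 0 := by simp [spIdx]
          rw [this]
          simp [tokA, htm, wordsC]
        · have hsps : spIdx (' ' :: cs) run = spIdx cs (run + 1) + 1 := by
            simp [spIdx, h3]
          rw [htermc, hsps]
          have hmin : min (termIdx cs + 1) (spIdx cs (run + 1) + 1)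
              = min (termIdx cs) (spIdx cs (run + 1)) + 1 := by omega
          rw [hmin, List.take_succ_cons]
          by_cases h : buf.isEmpty
          · have hbuf : buf = [] := List.isEmpty_iff.mp h
            subst hbuf
            rw [show tokA (' ' :: cs) tokens [] run
                  = tokA cs tokens [] (run + 1) by simp [tokA, htm, h3]]
            rw [ih tokens [] (run + 1) (by omega) (Or.inl rfl)]
            simp [wordsC, hss]
          · have hbuf : buf ≠ [] := by simpa [List.isEmpty_iff] using h
            rw [show tokA (' ' :: cs) tokens buf run
                  = tokA cs (tokens ++ [String.ofList buf]) [] (run + 1) by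
                simp [tokA, htm, h3, h]]
            rw [ih (tokens ++ [String.ofList buf]) [] (run + 1) (by omega) (Or.inl rfl)]
            simp [wordsC, hss, h]
      · by_cases hws : PySem.Chars.isspace c
        · have hsps : spIdx (c :: cs) run = spIdx cs 0 + 1 := by simp [spIdx, hsp]
          rw [htermc, hsps]
          have hmin : min (termIdx cs + 1) (spIdx cs 0 + 1)
              = min (termIdx cs) (spIdx cs 0) + 1 := by omega
          rw [hmin, List.take_succ_cons]
          by_cases h : buf.isEmpty
          · have hbuf : buf = [] := List.isEmpty_iff.mp h
            subst hbuf
            rw [show tokA (c :: cs) tokens [] run = tokA cs tokens [] 0 by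
                simp [tokA, htm, hsp, hws]]
            rw [ih tokens [] 0 (by omega) (Or.inl rfl)]
            simp [wordsC, hws]
          · have hbuf : buf ≠ [] := by simpa [List.isEmpty_iff] using h
            rw [show tokA (c :: cs) tokens buf run
                  = tokA cs (tokens ++ [String.ofList buf]) [] 0 by
                simp [tokA, htm, hsp, hws, h]]
            rw [ih (tokens ++ [String.ofList buf]) [] 0 (by omega) (Or.inl rfl)]
            simp [wordsC, hws, h]
        · have hsps : spIdx (c :: cs) run = spIdx cs 0 + 1 := by simp [spIdx, hsp]
          rw [htermc, hsps]
          have hmin : min (termIdx cs + 1) (spIdx cs 0 + 1)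
              = min (termIdx cs) (spIdx cs 0) + 1 := by omega
          rw [hmin, List.take_succ_cons]
          rw [show tokA (c :: cs) tokens buf run = tokA cs tokens (buf ++ [c]) 0 by
              simp [tokA, htm, hsp, hws]]
          rw [ih tokens (buf ++ [c]) 0 (by omega) (Or.inr rfl)]
          simp [wordsC, hws]

-- B's terminator scan computes termIdx
lemma bScan_eq (cs : List Char) : ∀ i cut, cut = i + cs.length →
    bScan cs i cut = i + termIdx cs := by
  induction cs with
  | nil => intro i cut h; simp [bScan, termIdx, h]
  | cons c cs ih =>
    intro i cut h
    by_cases hc : pyTERMINATORS.contains c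
    · have htm : c ∈ pyTERMINATORS := by simpa using hc
      simp [bScan, termIdx, htm]
    · simp only [bScan, termIdx]
      rw [if_neg hc, if_neg hc, ih (i + 1) cut (by simp at h; omega)]
      omega

-- Str.split₀ computes wordsC
lemma strSplit₀_eq (s : String) :
    PySem.Str.split₀ s = (wordsC [] s.toList).map String.ofList := by
  have h := PySem.Str.split₀_map_toList s
  rw [show PySem.Chars.split₀ s.toList = wordsC [] s.toList from by
        simpa using split₀_go_wordsC s.toList [] []] at h
  have h2 : (List.map String.toList (PySem.Str.split₀ s)).map String.ofList
      = (wordsC [] s.toList).map String.ofList := by rw [h]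
  simpa [List.map_map, Function.comp_def, String.ofList_toList] using h2

-- the two cut indices give the same words
lemma wordsC_cut_eq (cs : List Char) (cut : Nat)
    (hcut : cut = if (if trip3 cs < cs.length then ((trip3 cs : Int)) - 2 else -1) ≠ -1 ∧
        (if trip3 cs < cs.length then ((trip3 cs : Int)) - 2 else -1) < (termIdx cs : Int)
      then (if trip3 cs < cs.length then ((trip3 cs : Int)) - 2 else -1).toNat else termIdx cs) :
    wordsC [] (cs.take (min (termIdx cs) (trip3 cs))) = wordsC [] (cs.take cut) := by
  by_cases h : trip3 cs < cs.length
  · obtain ⟨h2, hpre⟩ := trip3_spec cs h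
    rw [if_pos h] at hcut
    by_cases hlt : (trip3 cs : Int) - 2 < (termIdx cs : Int)
    · rw [if_pos ⟨by omega, hlt⟩] at hcut
      have hcut' : cut = trip3 cs - 2 := by omega
      have hterm_ge : trip3 cs ≤ termIdx cs := by
        by_contra hx
        have hT : termIdx cs = trip3 cs - 1 := by omega
        have hTlen : termIdx cs < cs.length := by omega
        have hmem := termIdx_spec cs hTlen
        obtain ⟨r, hr⟩ := hpre
        have h1' : (cs.drop (trip3 cs - 2))[1]? = some ' ' := by rw [← hr]; rfl
        rw [List.getElem?_drop] at h1'
        have hsome : cs[termIdx cs]? = some ' ' := by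
          rw [hT, show trip3 cs - 1 = trip3 cs - 2 + 1 by omega]; exact h1'
        rw [List.getElem?_eq_getElem hTlen] at hsome
        rw [Option.some.injEq] at hsome
        rw [hsome] at hmem
        exact absurd hmem (by decide)
      rw [min_eq_right hterm_ge, hcut']
      obtain ⟨r, hr⟩ := hpre
      have htake : cs.take (trip3 cs) = cs.take (trip3 cs - 2) ++ [' ', ' '] := by
        rw [show trip3 cs = (trip3 cs - 2) + 2 by omega, List.take_add, ← hr]
        simp
      rw [htake, show cs.take (trip3 cs - 2) ++ [' ', ' ']
            = (cs.take (trip3 cs - 2) ++ [' ']) ++ [' '] by simp,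
          wordsC_append_space, wordsC_append_space]
    · rw [if_neg (by intro hx; exact hlt hx.2)] at hcut
      rw [min_eq_left (by omega), hcut]
  · rw [if_neg h, if_neg (by simp)] at hcut
    have hlen : trip3 cs = cs.length := by have := trip3_le cs; omega
    rw [min_eq_left (by rw [hlen]; exact termIdx_le cs), hcut]

-- ===== VERDICT (by name: the statement is the Claim_ definition above) =====
theorem tokenize_command_py_spec : Claim_equal_tokenize_command_py := by
  intro text _
  show tokenize_command_py text = tokenize_command_py_alt text
  have hj : PySem.Str.find text (String.ofList [' ', ' ', ' '])
      = (if trip3 text.toList < text.toList.length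
          then ((trip3 text.toList : Int)) - 2 else -1) := by
    rw [PySem.Str.find_eq, String.toList_ofList]
    rw [show PySem.Chars.find text.toList [' ', ' ', ' ']
          = PySem.Chars.find.go [' ', ' ', ' '] text.toList 0 from rfl]
    rw [find_go_trip3 text.toList 0]
    simp
  have hcut0 : bScan text.toList 0 (PySem.Str.len text).toNat = termIdx text.toList := by
    rw [show (PySem.Str.len text).toNat = text.toList.length from by
          rw [PySem.Str.len_eq]; simp]
    simpa using bScan_eq text.toList 0 text.toList.length (by omega)
  simp only [tokenize_command_py, tokenize_command_py_alt, hj, hcut0, strSplit₀_eq,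
    PySem.Str.toList_slice, PySem.Chars.slice_eq_listSlice]
  rw [PySem.List.slice_to text.toList (by positivity), Int.toNat_natCast]
  rw [tokA_eq text.toList [] [] 0 (by omega) (Or.inl rfl), (spIdx_trip3 text.toList).1]
  rw [wordsC_cut_eq text.toList _ rfl]
  simp
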